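-- pv_equiv track=rewrite | github.com/Yamir-Haidar/Seminario-py | logic/Functions.py | omicron_has_higher_frequency
-- ===== SOURCE A (Python) =====
-- def omicron_has_higher_frequency(string: str) -> bool:
--     """
--     Devuelve True si el string "omicron" es el que sucede mas veces en
--     el string introducido por parametros(En caso de empate con otro
--     string en mayor numero de repeticiones, la funcion devolvera False).
--     :param string: str
--     :return: bool
--     """
--     switch_case = {}
--     for word in string.split(" - "):
--         if word in switch_case:
--             switch_case[word] += 1
--         else:
--             switch_case[word] = 1
--     return max(switch_case, key=switch_case.get) == "omicron" and \
--         list(switch_case.values()).count(switch_case["omicron"]) == 1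
-- ===== SOURCE B (Python) =====
-- def omicron_has_higher_frequency(string: str) -> bool:
--     """True iff "omicron" occurs strictly more often than every other
--     " - "-separated word. No frequency dict: count omicron once, then
--     compare every other distinct word's count against it."""
--     words = string.split(" - ")
--     oc = words.count("omicron")
--     return oc > 0 and all(words.count(w) < oc for w in set(words) if w != "omicron")
-- ===== Notes on version B (the rewrite author's own statement) =====
-- stated objective: simpler
-- what changed: Drops the frequency dict and the argmax+uniqueness-of-max-value test: B counts 'omicron' directly with list.count and returns true iff that count is positive and every other distinct word's count is strictly smaller.
import Mathlib
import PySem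

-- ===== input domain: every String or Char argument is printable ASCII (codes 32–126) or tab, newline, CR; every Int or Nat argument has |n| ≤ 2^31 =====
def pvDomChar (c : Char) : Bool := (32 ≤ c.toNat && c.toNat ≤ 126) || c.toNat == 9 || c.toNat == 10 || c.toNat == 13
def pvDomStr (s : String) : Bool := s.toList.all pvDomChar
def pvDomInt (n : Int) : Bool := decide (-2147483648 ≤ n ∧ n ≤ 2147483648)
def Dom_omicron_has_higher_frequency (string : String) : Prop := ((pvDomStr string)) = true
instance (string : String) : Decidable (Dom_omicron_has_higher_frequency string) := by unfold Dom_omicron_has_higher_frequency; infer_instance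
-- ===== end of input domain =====

-- B replaces A's dict + argmax + uniqueness-of-max-value test by counting "omicron"
-- directly and comparing every other distinct word's count against it (objective: simpler).

-- ===== PORT A =====
-- Port of A. Notes: the separator " - " is nonempty, so str.split never raises (the
-- `none` branches below are unreachable; split of any string is a nonempty list, so
-- `max` never sees an empty dict). Python's `switch_case["omicron"]` is evaluated only
-- under the short-circuiting `and`, after `max(...) == "omicron"` guarantees the key is
-- present; `getD "omicron" 0` agrees with it there.
def omicron_has_higher_frequency (string : String) : Bool :=
  match PySem.Str.split? string " - " with
  | none => false
  | some words =>
    let switch_case : PySem.Dict String Int :=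
      words.foldl (fun d word =>
        if d.contains word then d.insert word (d.getD word 0 + 1)
        else d.insert word 1) PySem.Dict.empty
    match PySem.List.max? switch_case.keys (fun w => switch_case.getD w 0) with
    | none => false
    | some m =>
        (m == "omicron") &&
          (PySem.List.count switch_case.values (switch_case.getD "omicron" 0) == 1)

-- ===== PORT B =====
-- Port of B (Source B): words.count("omicron") once, then one pass over set(words).
def omicron_has_higher_frequency_alt (string : String) : Bool :=
  match PySem.Str.split? string " - " with
  | none => false
  | some words =>
    let oc := PySem.List.count words "omicron"
    decide (0 < oc) &&
      ((PySem.Set.ofList words).filter (fun w => w != "omicron")).all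
        (fun w => decide (PySem.List.count words w < oc))

-- ===== PRECONDITION & SPEC =====
def Spec_omicron_has_higher_frequency (string : String) (out : Bool) : Prop := out = omicron_has_higher_frequency_alt string
instance (string : String) (out : Bool) : Decidable (Spec_omicron_has_higher_frequency string out) := by unfold Spec_omicron_has_higher_frequency; infer_instance

-- ===== CLAIM (what is proved, stated in full; the proofs are below) =====
def Claim_equal_omicron_has_higher_frequency : Prop := ∀ (string : String), Dom_omicron_has_higher_frequency string → Spec_omicron_has_higher_frequency string (omicron_has_higher_frequency string)

-- ===== LEMMAS AND PROOFS =====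

-- A's counting loop builds exactly the counter dict: when the key is absent its
-- stored value would be 0, so both branches insert `getD + 1`.
theorem pvLoopEqCounter (words : List String) :
    words.foldl (fun d word =>
      if d.contains word then d.insert word (d.getD word 0 + 1)
      else d.insert word 1) PySem.Dict.empty = PySem.Dict.counter words := by
  have hstep : (fun (d : PySem.Dict String Int) word =>
      if d.contains word then d.insert word (d.getD word 0 + 1)
      else d.insert word 1)
      = (fun (d : PySem.Dict String Int) word => d.insert word (d.getD word 0 + 1)) := by
    funext d word
    by_cases h : d.contains word = true
    · simp [h]
    · have h0 : d.getD word 0 = 0 := by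
        rw [PySem.Dict.getD_eq_get?_getD]
        have hg : d.get? word = none := by
          cases hg : d.get? word with
          | none => rfl
          | some v =>
            rw [PySem.Dict.contains_eq_isSome_get?, hg] at h
            simp at h
        rw [hg]
        rfl
      simp [h, h0]
  rw [hstep, PySem.Dict.foldl_insert_getD_add_one_eq_counter]

-- the step function of PySem.List.max?, named so the fold lemmas below can rewrite it
def pvStep {α : Type} (key : α → ℤ) : Option α → α → Option α := fun acc x =>
  match acc with
  | none => some x
  | some m => if key m < key x then some x else some m

theorem pvStep_none {α : Type} (key : α → ℤ) (x : α) : pvStep key none x = some x := rfl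

theorem pvStep_some {α : Type} (key : α → ℤ) (m x : α) :
    pvStep key (some m) x = if key m < key x then some x else some m := rfl

theorem pvMaxEqFold {α : Type} (key : α → ℤ) (xs : List α) :
    PySem.List.max? xs key = List.foldl (pvStep key) none xs := rfl

-- the fold never loses a `some` accumulator, and its result is the accumulator
-- or a list element
theorem pvMaxFoldSome {α : Type} (key : α → ℤ) :
    ∀ (rest : List α) (m : α), ∃ r,
      List.foldl (pvStep key) (some m) rest = some r ∧ (r = m ∨ r ∈ rest) := by
  intro rest
  induction rest with
  | nil => intro m; exact ⟨m, rfl, Or.inl rfl⟩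
  | cons y rest ih =>
    intro m
    rw [List.foldl_cons, pvStep_some]
    by_cases h : key m < key y
    · rw [if_pos h]
      obtain ⟨r, hr, hmem⟩ := ih y
      refine ⟨r, hr, Or.inr ?_⟩
      rcases hmem with h1 | h1
      · simp [h1]
      · simp [h1]
    · rw [if_neg h]
      obtain ⟨r, hr, hmem⟩ := ih m
      refine ⟨r, hr, ?_⟩
      rcases hmem with h1 | h1
      · exact Or.inl h1
      · exact Or.inr (by simp [h1])

-- Python's max over a nonempty list returns some element of it
theorem pvMaxSome {α : Type} (key : α → ℤ) (xs : List α) (hxs : xs ≠ []) :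
    ∃ m, PySem.List.max? xs key = some m ∧ m ∈ xs := by
  cases xs with
  | nil => exact absurd rfl hxs
  | cons y rest =>
    rw [pvMaxEqFold, List.foldl_cons, pvStep_none]
    obtain ⟨r, hr, hmem⟩ := pvMaxFoldSome key rest y
    refine ⟨r, hr, ?_⟩
    rcases hmem with h1 | h1
    · simp [h1]
    · simp [h1]

-- if x is in the list and every other element has a strictly smaller key,
-- then the fold returns x
theorem pvMaxOfStrict {α : Type} (key : α → ℤ) (x : α) :
    ∀ (rest : List α) (m : α),
      (m = x ∨ (x ∈ rest ∧ key m < key x)) →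
      (∀ y ∈ rest, y ≠ x → key y < key x) →
      List.foldl (pvStep key) (some m) rest = some x := by
  intro rest
  induction rest with
  | nil =>
    intro m hm _
    rcases hm with rfl | ⟨hx, _⟩
    · rfl
    · cases hx
  | cons y rest ih =>
    intro m hm hlt
    rw [List.foldl_cons, pvStep_some]
    rcases hm with rfl | ⟨hx, hkm⟩
    · by_cases hy : y = m
      · subst hy
        rw [if_neg (lt_irrefl (key y))]
        exact ih y (Or.inl rfl) (fun z hz => hlt z (List.mem_cons_of_mem _ hz))
      · have hylt : key y < key m := hlt y (by simp) hy
        rw [if_neg (not_lt.mpr hylt.le)]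
        exact ih m (Or.inl rfl) (fun z hz => hlt z (List.mem_cons_of_mem _ hz))
    · rcases List.mem_cons.mp hx with rfl | hx'
      · rw [if_pos hkm]
        exact ih x (Or.inl rfl) (fun z hz => hlt z (List.mem_cons_of_mem _ hz))
      · by_cases hy : y = x
        · subst hy
          rw [if_pos hkm]
          exact ih y (Or.inl rfl) (fun z hz => hlt z (List.mem_cons_of_mem _ hz))
        · have hylt : key y < key x := hlt y (by simp) hy
          by_cases h : key m < key y
          · rw [if_pos h]
            exact ih y (Or.inr ⟨hx', hylt⟩) (fun z hz => hlt z (List.mem_cons_of_mem _ hz))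
          · rw [if_neg h]
            exact ih m (Or.inr ⟨hx', hkm⟩) (fun z hz => hlt z (List.mem_cons_of_mem _ hz))

theorem pvMaxEqOfStrict {α : Type} (key : α → ℤ) (x : α) (xs : List α) (hx : x ∈ xs)
    (h : ∀ y ∈ xs, y ≠ x → key y < key x) : PySem.List.max? xs key = some x := by
  cases xs with
  | nil => cases hx
  | cons y rest =>
    rw [pvMaxEqFold, List.foldl_cons, pvStep_none]
    rcases List.mem_cons.mp hx with rfl | hx'
    · exact pvMaxOfStrict key x rest x (Or.inl rfl)
        (fun z hz => h z (List.mem_cons_of_mem _ hz))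
    · by_cases hy : y = x
      · subst hy
        exact pvMaxOfStrict key y rest y (Or.inl rfl)
          (fun z hz => h z (List.mem_cons_of_mem _ hz))
      · exact pvMaxOfStrict key x rest y
          (Or.inr ⟨hx', h y (by simp) hy⟩)
          (fun z hz => h z (List.mem_cons_of_mem _ hz))

-- how many distinct words share omicron's count, on a nodup list containing
-- "omicron": it is 1 iff no other word has that count
theorem pvCountEqOne (S : List String) (c : String → ℕ) (oc : ℕ)
    (hom : "omicron" ∈ S) (hnd : S.Nodup) (hoc : c "omicron" = oc) :
    (List.count (oc : ℤ) (S.map fun w => (c w : ℤ)) = 1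
      ↔ ∀ w ∈ S, w ≠ "omicron" → c w ≠ oc) := by
  have hperm : S.Perm ("omicron" :: S.erase "omicron") := List.perm_cons_erase hom
  have hcnt : List.count (oc : ℤ) (S.map fun w => (c w : ℤ))
      = List.countP (fun w => (c w : ℤ) == (oc : ℤ)) S := by
    rw [List.count, List.countP_map]
    rfl
  have hone : (if (fun w => (c w : ℤ) == (oc : ℤ)) "omicron" then 1 else 0) = 1 := by
    simp [hoc]
  rw [hcnt, hperm.countP_eq, List.countP_cons, hone]
  constructor
  · intro h1 w hw hne
    have hz : List.countP (fun w => (c w : ℤ) == (oc : ℤ)) (S.erase "omicron") = 0 := by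
      omega
    have hwmem : w ∈ S.erase "omicron" := (hnd.mem_erase_iff).mpr ⟨hne, hw⟩
    have hnp := (List.countP_eq_zero.mp hz) w hwmem
    simp only [beq_iff_eq, Nat.cast_inj] at hnp
    exact hnp
  · intro h1
    have hz : List.countP (fun w => (c w : ℤ) == (oc : ℤ)) (S.erase "omicron") = 0 := by
      apply List.countP_eq_zero.mpr
      intro w hw
      obtain ⟨hne, hwS⟩ := (hnd.mem_erase_iff).mp hw
      simp only [beq_iff_eq, Nat.cast_inj]
      exact h1 w hwS hne
    omega

-- the core equivalence, for the common word list produced by split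
theorem pvCore (words : List String) :
    (match PySem.List.max? (PySem.Dict.counter words).keys
        (fun w => (PySem.Dict.counter words).getD w 0) with
     | none => false
     | some m => (m == "omicron") &&
         (PySem.List.count (PySem.Dict.counter words).values
           ((PySem.Dict.counter words).getD "omicron" 0) == 1))
    = (decide (0 < PySem.List.count words "omicron") &&
        ((PySem.Set.ofList words).filter (fun w => w != "omicron")).all
          (fun w => decide (PySem.List.count words w < PySem.List.count words "omicron"))) := by
  have hgetD : ∀ w, (PySem.Dict.counter words).getD w 0 = ((List.count w words : ℕ) : ℤ) :=
    fun w => PySem.Dict.getD_counter words w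
  have hkeys : (PySem.Dict.counter words).keys = PySem.Set.ofList words :=
    PySem.Dict.keys_counter words
  have hkeyfun : (fun w => (PySem.Dict.counter words).getD w 0)
      = (fun w => ((List.count w words : ℕ) : ℤ)) := funext hgetD
  have hvals : (PySem.Dict.counter words).values
      = (PySem.Set.ofList words).map (fun w => ((List.count w words : ℕ) : ℤ)) := by
    rw [PySem.Dict.values_eq_map_keys _ (PySem.Dict.nodup_keys_counter words) 0, hkeys]
    exact List.map_congr_left (fun w _ => hgetD w)
  by_cases hw : words = []
  · subst hw
    rfl
  · have hnd : (PySem.Set.ofList words).Nodup := PySem.Set.nodup_ofList words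
    have hSne : PySem.Set.ofList words ≠ [] := by
      cases words with
      | nil => exact absurd rfl hw
      | cons w0 rest =>
        exact List.ne_nil_of_mem ((PySem.Set.mem_ofList _ w0).mpr (by simp))
    obtain ⟨m, hm, hmmem⟩ :=
      pvMaxSome (fun w => ((List.count w words : ℕ) : ℤ)) (PySem.Set.ofList words) hSne
    have hm' : PySem.List.max? (PySem.Dict.counter words).keys
        (fun w => (PySem.Dict.counter words).getD w 0) = some m := by
      rw [hkeys, hkeyfun]
      exact hm
    rw [hm', hvals, hgetD "omicron"]
    show ((m == "omicron") &&
        (PySem.List.count ((PySem.Set.ofList words).map fun w => ((List.count w words : ℕ) : ℤ))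
          ((List.count "omicron" words : ℕ) : ℤ) == 1)) = _
    rw [Bool.eq_iff_iff]
    simp only [Bool.and_eq_true, beq_iff_eq, decide_eq_true_eq, List.all_eq_true,
      List.mem_filter, bne_iff_ne, ne_eq, and_imp, PySem.List.count]
    constructor
    · rintro ⟨rfl, hcnt1⟩
      have hom : "omicron" ∈ words := (PySem.Set.mem_ofList words _).mp hmmem
      have hle : ∀ y ∈ PySem.Set.ofList words,
          ((List.count y words : ℕ) : ℤ) ≤ ((List.count "omicron" words : ℕ) : ℤ) :=
        fun y hy => PySem.List.max?_isMax hm y hy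
      have hne := (pvCountEqOne (PySem.Set.ofList words)
        (fun w => List.count w words) _ hmmem hnd rfl).mp hcnt1
      refine ⟨List.count_pos_iff.mpr hom, fun y hyS hyne => ?_⟩
      have h1 : List.count y words ≤ List.count "omicron" words := by
        exact_mod_cast hle y hyS
      exact lt_of_le_of_ne h1 (hne y hyS hyne)
    · rintro ⟨hpos, hstrict⟩
      have hom : "omicron" ∈ words := List.count_pos_iff.mp hpos
      have homS : "omicron" ∈ PySem.Set.ofList words :=
        (PySem.Set.mem_ofList words _).mpr hom
      have hstrictS : ∀ y ∈ PySem.Set.ofList words, y ≠ "omicron" →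
          ((List.count y words : ℕ) : ℤ) < ((List.count "omicron" words : ℕ) : ℤ) := by
        intro y hy hne
        exact_mod_cast hstrict y hy hne
      have hmax : PySem.List.max? (PySem.Set.ofList words)
          (fun w => ((List.count w words : ℕ) : ℤ)) = some "omicron" :=
        pvMaxEqOfStrict _ _ _ homS hstrictS
      have hmom : m = "omicron" := Option.some.inj (hm.symm.trans hmax)
      subst hmom
      refine ⟨rfl, ?_⟩
      apply (pvCountEqOne (PySem.Set.ofList words)
        (fun w => List.count w words) _ homS hnd rfl).mpr
      intro y hy hne
      exact ne_of_lt (by exact_mod_cast hstrictS y hy hne)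

-- ===== VERDICT (by name: the statement is the Claim_ definition above) =====
theorem omicron_has_higher_frequency_spec : Claim_equal_omicron_has_higher_frequency := by
  intro string _
  unfold Spec_omicron_has_higher_frequency
  unfold omicron_has_higher_frequency omicron_has_higher_frequency_alt
  cases h : PySem.Str.split? string " - " with
  | none => rfl
  | some words =>
    simp only []
    rw [pvLoopEqCounter]
    exact pvCore words
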